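-- pv_equiv track=rewrite | github.com/rigizer/algorithm | 백준/Silver/31575. 도시와 비트코인/도시와 비트코인.py | bfs
-- ===== SOURCE A (Python) =====
-- from collections import deque
--
-- dy = [0, 1]
--
-- dx = [1, 0]
--
-- def bfs(n, m, board):
--     queue = deque()
--     visited = [[False] * n for _ in range(m)]
--
--     queue.append((0, 0))
--     visited[0][0] = True
--
--     while queue:
--         y, x = queue.popleft()
--
--         if (y, x) == (m - 1, n - 1):
--             return 'Yes'
--
--         for d in range(2):
--             ny = y + dy[d]
--             nx = x + dx[d]
--
--             if 0 <= ny < m and 0 <= nx < n and board[ny][nx] == 1 and visited[ny][nx] == False: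
--                 queue.append((ny, nx))
--                 visited[ny][nx] = True
--
--     return 'No'
-- ===== SOURCE B (Python) =====
-- def bfs(n, m, board):
--     # Row-by-row DP over reachability (right/down through 1-cells); start cell
--     # is reachable unconditionally, as in the original. A cell's value is read
--     # only once some predecessor is reachable (same access pattern as the BFS),
--     # and the sweep stops as soon as a row has no reachable cell.
--     prev = []
--     for i in range(m):
--         cur = []
--         left = False
--         for j in range(n):
--             if i == 0 and j == 0:
--                 r = True
--             else:
--                 r = ((i > 0 and prev[j]) or left) and board[i][j] == 1
--             cur.append(r)
--             left = r
--         prev = cur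
--         if not any(prev):
--             break
--     return 'Yes' if prev[n - 1] else 'No'
-- ===== Notes on version B (the rewrite author's own statement) =====
-- stated objective: faster
-- what changed: Replaces the deque-BFS with its preallocated m×n visited grid by a row-by-row DP sweep that keeps only the previous row's reachability flags and stops at the first row with no reachable cell, so typical cost is O(n * reached-rows) and O(n) space instead of Θ(m*n) time and space.
import Mathlib
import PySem

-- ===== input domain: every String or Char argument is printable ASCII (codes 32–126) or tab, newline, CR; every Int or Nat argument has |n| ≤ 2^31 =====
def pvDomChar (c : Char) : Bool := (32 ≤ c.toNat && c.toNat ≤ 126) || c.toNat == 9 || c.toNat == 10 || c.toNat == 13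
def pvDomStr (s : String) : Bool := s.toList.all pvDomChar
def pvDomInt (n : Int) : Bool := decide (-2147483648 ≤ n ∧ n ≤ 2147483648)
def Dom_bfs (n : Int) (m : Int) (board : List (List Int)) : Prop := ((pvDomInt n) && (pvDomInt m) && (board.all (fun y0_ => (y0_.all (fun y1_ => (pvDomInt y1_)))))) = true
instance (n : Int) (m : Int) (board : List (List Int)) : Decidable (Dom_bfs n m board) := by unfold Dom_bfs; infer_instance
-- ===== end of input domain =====

-- B replaces the BFS (deque + preallocated m×n visited grid) by a row-by-row DP sweep
-- keeping only the previous row's reachability flags, stopping at the first row with no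
-- reachable cell.

-- ===== PORT A =====
-- board[ny][nx] / visited[ny][nx] (Int indices, IndexError = none)
def bgetA (board : List (List Int)) (y x : Int) : Option Int :=
  (PySem.List.pyGet? board y).bind (fun row => PySem.List.pyGet? row x)

def vgetA (v : List (List Bool)) (y x : Int) : Option Bool :=
  (PySem.List.pyGet? v y).bind (fun row => PySem.List.pyGet? row x)

-- visited[y][x] = True (indices are guarded nonnegative and in range where A executes it)
def vsetA (v : List (List Bool)) (y x : Nat) : List (List Bool) :=
  match v[y]? with
  | some row => v.set y (row.set x true)
  | none => v

-- one iteration of 'for d in range(2)': guard, append, mark visited.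
-- (In Python a ragged board can raise IndexError inside the guard; Pre_ excludes those
-- inputs, so returning a failed guard there instead is outside every claim.)
def stepA (n m : Int) (board : List (List Int)) (qv : List (Int × Int) × List (List Bool))
    (ny nx : Int) : List (Int × Int) × List (List Bool) :=
  if 0 ≤ ny ∧ ny < m ∧ 0 ≤ nx ∧ nx < n ∧ bgetA board ny nx = some 1 ∧ vgetA qv.2 ny nx = some false
  then (qv.1 ++ [(ny, nx)], vsetA qv.2 ny.toNat nx.toNat)
  else qv

-- the 'while queue' loop; fuel is only a totality guard (proved sufficient under Pre_)
def bfsLoop (n m : Int) (board : List (List Int)) :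
    Nat → List (Int × Int) → List (List Bool) → String
  | 0, _, _ => "No"
  | _ + 1, [], _ => "No"
  | fuel + 1, (y, x) :: rest, visited =>
    if y = m - 1 ∧ x = n - 1 then "Yes"
    else
      let qv := stepA n m board (stepA n m board (rest, visited) y (x + 1)) (y + 1) x
      bfsLoop n m board fuel qv.1 qv.2

def bfs (n : Int) (m : Int) (board : List (List Int)) : String :=
  bfsLoop n m board (3 * (m.toNat * n.toNat) + 2) [(0, 0)]
    (vsetA (List.replicate m.toNat (List.replicate n.toNat false)) 0 0)

-- ===== PORT B =====
-- board[i][j] for 0 ≤ i < m, 0 ≤ j < n (exact under Pre_: indices in range)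
def bvalB (board : List (List Int)) (i j : Nat) : Int := (board.getD i []).getD j 0

-- the body of B's inner loop: reachability flag of cell (i, j)
def dpCell (board : List (List Int)) (prev : List Bool) (i j : Nat) (left : Bool) : Bool :=
  if i = 0 ∧ j = 0 then true
  else ((decide (0 < i) && prev.getD j false) || left) && (bvalB board i j == 1)

-- one row of B's sweep ('cur' built left to right, 'left' is the previous flag)
-- 'cur.append(r)' is ported as cons onto the accumulator + a final reverse (the
-- standard O(1)-append list transcription)
def dpRow (board : List (List Int)) (i : Nat) (n : Nat) (prev : List Bool) : List Bool :=
  (((List.range n).foldl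
    (fun (st : List Bool × Bool) j =>
      let r := dpCell board prev i j st.2
      (r :: st.1, r)) ([], false)).1).reverse

-- the row loop with its early exit; the first argument counts the remaining rows
def dpGo (board : List (List Int)) (n : Nat) : Nat → Nat → List Bool → List Bool
  | 0, _, prev => prev
  | k + 1, i, _prev =>
      let cur := dpRow board i n _prev
      if cur.any id then dpGo board n k (i + 1) cur else cur

def bfs_alt (n : Int) (m : Int) (board : List (List Int)) : String :=
  let prev := dpGo board n.toNat m.toNat 0 []
  if prev.getD (n.toNat - 1) false then "Yes" else "No"

-- ===== PRECONDITION & SPEC =====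
-- board[y][x] read with default 0 (used only to state Pre_ and in the proofs)
def cellD (board : List (List Int)) (y x : Nat) : Int := (board.getD y []).getD x 0

-- reachability of row i, given the previous row's reachability flags
-- (structural recursion, so that `decide` can evaluate Pre_)
def reachRowD (board : List (List Int)) (i : Nat) (prev : Nat → Bool) : Nat → Bool
  | 0 => if i = 0 then true else (cellD board i 0 == 1) && prev 0
  | x + 1 => (cellD board i (x + 1) == 1) && (prev (x + 1) || reachRowD board i prev x)

def reachRows (board : List (List Int)) : Nat → (Nat → Bool)
  | 0 => reachRowD board 0 (fun _ => false)
  | i + 1 => reachRowD board (i + 1) (reachRows board i)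

-- reachable from (0, 0) by right/down moves through 1-cells ((0, 0) unconditionally)
def reachD (board : List (List Int)) (y x : Nat) : Bool := reachRows board y x

def presentB (board : List (List Int)) (y x : Nat) : Bool :=
  decide (y < board.length) && decide (x < (board.getD y []).length)

-- cell (y, x) is unreachable, or the target, or both its in-range right/down neighbour
-- positions are present in the board
def okCell (board : List (List Int)) (M N y x : Nat) : Bool :=
  !(reachD board y x) || (decide (y = M - 1) && decide (x = N - 1)) ||
  ((!decide (x + 1 < N) || presentB board y (x + 1)) &&
   (!decide (y + 1 < M) || presentB board (y + 1) x))

-- Pre_ = the inputs where A returns normally: m, n ≥ 1 (else visited[0][0] raises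
-- IndexError) and every in-range right/down neighbour position of a reachable non-target
-- cell is present in the (possibly ragged) board — precisely the cells whose value the
-- program reads (board[ny][nx] raises IndexError on a missing one).
-- (the quantifier is cut off at board.length + 1 / row length + 1: any cell beyond those
-- bounds other than (0, 0) reads as 0 via cellD, hence is unreachable and satisfies okCell
-- vacuously — proved in reach_in_bounds below)
def Pre_bfs (n : Int) (m : Int) (board : List (List Int)) : Prop :=
  1 ≤ n ∧ 1 ≤ m ∧
  ∀ y < min m.toNat (board.length + 1),
    ∀ x < min n.toNat ((board.getD y []).length + 1),
      okCell board m.toNat n.toNat y x = true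
instance (n : Int) (m : Int) (board : List (List Int)) : Decidable (Pre_bfs n m board) := by
  unfold Pre_bfs; infer_instance

def pvWitness_bfs : Int × Int × List (List Int) := (2, 2, [[1, 0], [1, 1]])

def Spec_bfs (n : Int) (m : Int) (board : List (List Int)) (out : String) : Prop := out = bfs_alt n m board
instance (n : Int) (m : Int) (board : List (List Int)) (out : String) : Decidable (Spec_bfs n m board out) := by unfold Spec_bfs; infer_instance

-- ===== CLAIM (what is proved, stated in full; the proofs are below) =====
def Claim_equal_bfs : Prop := ∀ (n : Int) (m : Int) (board : List (List Int)), Dom_bfs n m board → Pre_bfs n m board → Spec_bfs n m board (bfs n m board)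

-- ===== LEMMAS AND PROOFS =====

-- cell (y, x) is present in the (possibly ragged) board
def present (board : List (List Int)) (y x : Nat) : Prop :=
  y < board.length ∧ x < (board.getD y []).length

theorem reachD_00 (board : List (List Int)) : reachD board 0 0 = true := rfl

theorem reachD_0s (board : List (List Int)) (x : Nat) :
    reachD board 0 (x + 1) = ((cellD board 0 (x + 1) == 1) && reachD board 0 x) := rfl

theorem reachD_s0 (board : List (List Int)) (y : Nat) :
    reachD board (y + 1) 0 = ((cellD board (y + 1) 0 == 1) && reachD board y 0) := rfl

theorem reachD_ss (board : List (List Int)) (y x : Nat) :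
    reachD board (y + 1) (x + 1) = ((cellD board (y + 1) (x + 1) == 1) &&
      (reachD board y (x + 1) || reachD board (y + 1) x)) := rfl

theorem bvalB_cellD (board : List (List Int)) (i j : Nat) : bvalB board i j = cellD board i j := rfl

theorem reach_right (board : List (List Int)) (y x : Nat)
    (hr : reachD board y x = true) (hv : bvalB board y (x + 1) = 1) :
    reachD board y (x + 1) = true := by
  rw [bvalB_cellD] at hv
  cases y <;> simp [reachD_0s, reachD_ss, hv, hr]

theorem reach_down (board : List (List Int)) (y x : Nat)
    (hr : reachD board y x = true) (hv : bvalB board (y + 1) x = 1) :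
    reachD board (y + 1) x = true := by
  rw [bvalB_cellD] at hv
  cases x <;> simp [reachD_s0, reachD_ss, hv, hr]

-- ----- B side -----

theorem dpCell_spec (board : List (List Int)) (N i j : Nat) (prev : List Bool)
    (hj : j < N)
    (hprev : 0 < i → ∀ k, k < N → prev.getD k false = reachD board (i - 1) k) :
    dpCell board prev i j (if j = 0 then false else reachD board i (j - 1))
      = reachD board i j := by
  match i, j with
  | 0, 0 => simp [dpCell, reachD_00]
  | 0, x + 1 => simp [dpCell, reachD_0s, bvalB_cellD, Bool.and_comm]
  | y + 1, 0 =>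
      have h := hprev (Nat.succ_pos y) 0 hj
      simp at h
      simp [dpCell, reachD_s0, bvalB_cellD, Bool.and_comm, h]
  | y + 1, x + 1 =>
      have h := hprev (Nat.succ_pos y) (x + 1) hj
      simp at h
      simp [dpCell, reachD_ss, bvalB_cellD, Bool.and_comm, h]

theorem dpRow_aux (board : List (List Int)) (N i : Nat) (prev : List Bool)
    (hprev : 0 < i → ∀ k, k < N → prev.getD k false = reachD board (i - 1) k) :
    ∀ j, j ≤ N →
      (List.range j).foldl
        (fun (st : List Bool × Bool) j =>
          let r := dpCell board prev i j st.2
          (r :: st.1, r)) ([], false)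
      = (((List.range j).map (reachD board i)).reverse,
         if j = 0 then false else reachD board i (j - 1)) := by
  intro j
  induction j with
  | zero => intro _; simp
  | succ k ih =>
      intro hk
      rw [List.range_succ, List.foldl_append, ih (by omega)]
      simp only [List.foldl_cons, List.foldl_nil, List.map_append, List.map_cons, List.map_nil,
        List.reverse_append]
      have hcell := dpCell_spec board N i k prev (by omega) hprev
      simp only [hcell]
      simp

theorem dpRow_spec (board : List (List Int)) (N i : Nat) (prev : List Bool)
    (hprev : 0 < i → ∀ k, k < N → prev.getD k false = reachD board (i - 1) k) :
    dpRow board i N prev = (List.range N).map (reachD board i) := by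
  unfold dpRow
  rw [dpRow_aux board N i prev hprev N (le_refl N)]
  simp

-- a row with no reachable cell makes every later row unreachable (within the first N columns)
theorem row_false_propagate (board : List (List Int)) (N i : Nat)
    (h : ∀ j, j < N → reachD board i j = false) :
    ∀ d j, j < N → reachD board (i + d) j = false := by
  intro d
  induction d with
  | zero => exact h
  | succ e ih =>
      intro j hj
      induction j with
      | zero =>
          have := ih 0 (by omega)
          rw [show i + (e + 1) = (i + e) + 1 by omega, reachD_s0, this]
          simp
      | succ w ihw =>
          have hup := ih (w + 1) hj
          have hleft := ihw (by omega)
          rw [show i + (e + 1) = (i + e) + 1 by omega] at hleft ⊢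
          rw [reachD_ss, hup, hleft]
          simp

theorem dpGo_getD (board : List (List Int)) (N M : Nat) (hN : 1 ≤ N) :
    ∀ k i prev, k + i = M → 0 < k →
      (0 < i → prev = (List.range N).map (reachD board (i - 1))) →
      (dpGo board N k i prev).getD (N - 1) false = reachD board (M - 1) (N - 1) := by
  intro k
  induction k with
  | zero => omega
  | succ e ih =>
      intro i prev hki _ hprev
      have hprev' : 0 < i → ∀ j, j < N → prev.getD j false = reachD board (i - 1) j := by
        intro hi j hj
        rw [hprev hi, List.getD_eq_getElem?_getD]
        simp [hj]
      have hcur : dpRow board i N prev = (List.range N).map (reachD board i) :=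
        dpRow_spec board N i prev hprev'
      show (if (dpRow board i N prev).any id then
              dpGo board N e (i + 1) (dpRow board i N prev)
            else dpRow board i N prev).getD (N - 1) false = _
      by_cases he : e = 0
      · subst he
        have hres : ∀ b : List Bool,
            (if b.any id then dpGo board N 0 (i + 1) b else b) = b := by
          intro b; split <;> rfl
        rw [hres, hcur, List.getD_eq_getElem?_getD]
        have h1 : N - 1 < N := by omega
        have h2 : i = M - 1 := by omega
        simp [h1, h2]
      · split
        next =>
          rw [ih (i + 1) _ (by omega) (by omega) (fun _ => by simpa using hcur)]
        next hany =>
          -- the row is all false: every later row (in particular M - 1) is unreachable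
          rw [hcur] at hany ⊢
          have hallf : ∀ j, j < N → reachD board i j = false := by
            intro j hj
            by_contra hc
            have hc' : reachD board i j = true := by
              cases hh : reachD board i j
              · exact absurd hh hc
              · rfl
            apply hany
            simp only [List.any_eq_true]
            exact ⟨reachD board i j, by
              simp only [List.mem_map]
              exact ⟨j, by simp [hj], rfl⟩, by simp [hc']⟩
          have hM1 : M - 1 = i + (M - 1 - i) := by omega
          have := row_false_propagate board N i hallf (M - 1 - i) (N - 1) (by omega)
          rw [← hM1] at this
          rw [List.getD_eq_getElem?_getD]
          have h1 : N - 1 < N := by omega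
          simp [h1, this, hallf (N - 1) (by omega)]

theorem alt_spec (board : List (List Int)) (N M : Nat) (hN : 1 ≤ N) (hM : 1 ≤ M) :
    bfs_alt (N : Int) (M : Int) board
      = (if reachD board (M - 1) (N - 1) then "Yes" else "No") := by
  unfold bfs_alt
  simp only [Int.toNat_natCast]
  have hgd := dpGo_getD board N M hN M 0 [] (by omega) (by omega) (by omega)
  simp only [hgd]

-- ----- A side -----

def dims (N M : Nat) (v : List (List Bool)) : Prop :=
  v.length = M ∧ ∀ r ∈ v, r.length = N

def vcell (v : List (List Bool)) (y x : Nat) : Bool := (v.getD y []).getD x false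

def fc (v : List (List Bool)) : Nat := (v.map (fun r => r.count false)).sum

def expanded (N M : Nat) (board : List (List Int)) (v : List (List Bool)) (y x : Nat) : Prop :=
  (x + 1 < N → bvalB board y (x + 1) = 1 → vcell v y (x + 1) = true) ∧
  (y + 1 < M → bvalB board (y + 1) x = 1 → vcell v (y + 1) x = true)

def BfsInv (N M : Nat) (board : List (List Int)) (q : List (Int × Int)) (v : List (List Bool)) : Prop :=
  dims N M v ∧
  (∀ p ∈ q, ∃ y x : Nat, p = ((y : Int), (x : Int)) ∧ y < M ∧ x < N ∧
      vcell v y x = true ∧ reachD board y x = true) ∧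
  (∀ y x : Nat, y < M → x < N → vcell v y x = true →
      ((y : Int), (x : Int)) ∈ q ∨ expanded N M board v y x) ∧
  vcell v 0 0 = true ∧
  (vcell v (M - 1) (N - 1) = true → (((M : Int) - 1), ((N : Int) - 1)) ∈ q)

theorem vcell_replicate (N M a b : Nat) :
    vcell (List.replicate M (List.replicate N false)) a b = false := by
  unfold vcell
  rw [List.getD_eq_getElem?_getD]
  by_cases h : a < M
  · simp [List.getElem?_replicate, h, List.getD_eq_getElem?_getD]
    by_cases hb : b < N <;> simp [hb]
  · simp [h]

theorem vcell_vset_other (v : List (List Bool)) (y x a b : Nat)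
    (h : ¬(a = y ∧ b = x)) : vcell (vsetA v y x) a b = vcell v a b := by
  unfold vsetA vcell
  cases hrow : v[y]? with
  | none => rfl
  | some row =>
      by_cases hay : a = y
      · have hbx : b ≠ x := fun hbx => h ⟨hay, hbx⟩
        subst hay
        obtain ⟨hy, -⟩ := List.getElem?_eq_some_iff.mp hrow
        have h1 : (v.set a (row.set x true)).getD a [] = row.set x true := by
          rw [List.getD_eq_getElem?_getD, List.getElem?_set_self hy]; rfl
        have h2 : v.getD a [] = row := by
          rw [List.getD_eq_getElem?_getD, hrow]; rfl
        rw [h1, h2, List.getD_eq_getElem?_getD, List.getD_eq_getElem?_getD,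
            List.getElem?_set_ne (fun hxb => hbx hxb.symm)]
      · have h1 : (v.set y (row.set x true)).getD a [] = v.getD a [] := by
          rw [List.getD_eq_getElem?_getD, List.getD_eq_getElem?_getD,
              List.getElem?_set_ne (fun hya => hay hya.symm)]
        rw [h1]

theorem vcell_vset_self (N M : Nat) (v : List (List Bool)) (y x : Nat)
    (hd : dims N M v) (hy : y < M) (hx : x < N) :
    vcell (vsetA v y x) y x = true := by
  obtain ⟨hlen, hrows⟩ := hd
  have hy' : y < v.length := by omega
  have hxr : x < (v[y]).length := by
    rw [hrows _ (List.getElem_mem hy')]; exact hx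
  have hv : vsetA v y x = v.set y ((v[y]).set x true) := by
    unfold vsetA
    rw [List.getElem?_eq_getElem hy']
  rw [hv]
  unfold vcell
  have h1 : (v.set y ((v[y]).set x true)).getD y [] = (v[y]).set x true := by
    rw [List.getD_eq_getElem?_getD, List.getElem?_set_self hy']; rfl
  rw [h1, List.getD_eq_getElem?_getD, List.getElem?_set_self hxr]
  rfl

theorem vset_dims (N M : Nat) (v : List (List Bool)) (y x : Nat)
    (hd : dims N M v) : dims N M (vsetA v y x) := by
  obtain ⟨hlen, hrows⟩ := hd
  unfold vsetA
  cases hrow : v[y]? with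
  | none => exact ⟨hlen, hrows⟩
  | some row =>
      refine ⟨by simpa using hlen, ?_⟩
      intro r hr
      rcases List.mem_or_eq_of_mem_set hr with h | h
      · exact hrows r h
      · subst h
        rw [List.length_set]
        exact hrows row (List.mem_of_getElem? hrow)

theorem count_false_set (row : List Bool) (x : Nat) (hx : x < row.length)
    (hf : row.getD x false = false) :
    (row.set x true).count false + 1 = row.count false := by
  induction row generalizing x with
  | nil => simp at hx
  | cons a l ih =>
      cases x with
      | zero =>
          simp only [List.getD_cons_zero] at hf
          subst hf
          simp
      | succ k =>
          simp only [List.length_cons] at hx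
          simp only [List.getD_cons_succ] at hf
          have := ih k (by omega) hf
          simp only [List.set_cons_succ, List.count_cons]
          omega

theorem fc_cons (r : List Bool) (v : List (List Bool)) :
    fc (r :: v) = r.count false + fc v := by
  simp [fc]

theorem fc_set (v : List (List Bool)) (y : Nat) (r' : List Bool) (hy : y < v.length)
    (h : r'.count false + 1 = (v[y]).count false) :
    fc (v.set y r') + 1 = fc v := by
  induction v generalizing y with
  | nil => simp at hy
  | cons a l ih =>
      cases y with
      | zero =>
          simp only [List.getElem_cons_zero] at h
          simp only [List.set_cons_zero, fc_cons]
          omega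
      | succ k =>
          simp only [List.length_cons] at hy
          simp only [List.getElem_cons_succ] at h
          have := ih k (by omega) h
          simp only [List.set_cons_succ, fc_cons]
          omega

theorem fc_vset (N M : Nat) (v : List (List Bool)) (y x : Nat)
    (hd : dims N M v) (hy : y < M) (hx : x < N)
    (hf : vcell v y x = false) :
    fc (vsetA v y x) + 1 = fc v := by
  obtain ⟨hlen, hrows⟩ := hd
  have hy' : y < v.length := by omega
  have hxr : x < (v[y]).length := by
    rw [hrows _ (List.getElem_mem hy')]; exact hx
  have hcell : (v[y]).getD x false = false := by
    unfold vcell at hf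
    have houter : v.getD y [] = v[y] := by
      rw [List.getD_eq_getElem?_getD, List.getElem?_eq_getElem hy']
      rfl
    rw [houter] at hf
    rw [List.getD_eq_getElem?_getD]
    exact hf
  have hv : vsetA v y x = v.set y ((v[y]).set x true) := by
    unfold vsetA
    rw [List.getElem?_eq_getElem hy']
  rw [hv]
  exact fc_set v y _ hy' (count_false_set (v[y]) x hxr hcell)

theorem vget_eq (N M : Nat) (v : List (List Bool)) (y x : Nat)
    (hd : dims N M v) (hy : y < M) (hx : x < N) :
    vgetA v (y : Int) (x : Int) = some (vcell v y x) := by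
  obtain ⟨hlen, hrows⟩ := hd
  have hy' : y < v.length := by omega
  have hxr : x < (v[y]).length := by
    rw [hrows _ (List.getElem_mem hy')]; exact hx
  have hc : vcell v y x = (v[y])[x] := by
    unfold vcell
    simp [List.getD_eq_getElem?_getD, List.getElem?_eq_getElem hy',
      List.getElem?_eq_getElem hxr]
  unfold vgetA
  rw [PySem.List.pyGet?_natCast, List.getElem?_eq_getElem hy']
  simp only [Option.bind_some]
  rw [PySem.List.pyGet?_natCast, List.getElem?_eq_getElem hxr, hc]

theorem bget_eq (board : List (List Int)) (y x : Nat) (hp : present board y x) :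
    bgetA board (y : Int) (x : Int) = some (bvalB board y x) := by
  obtain ⟨hy', hxl⟩ := hp
  have hrow : board.getD y [] = board[y] := by
    rw [List.getD_eq_getElem?_getD, List.getElem?_eq_getElem hy']
    rfl
  rw [hrow] at hxl
  have hc : bvalB board y x = (board[y])[x] := by
    unfold bvalB
    rw [hrow, List.getD_eq_getElem?_getD, List.getElem?_eq_getElem hxl]
    rfl
  unfold bgetA
  rw [PySem.List.pyGet?_natCast, List.getElem?_eq_getElem hy']
  simp only [Option.bind_some]
  rw [PySem.List.pyGet?_natCast, List.getElem?_eq_getElem hxl, hc]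

-- completeness at an empty queue: the visited set is closed, so it contains every reachable cell
theorem closed_reach (N M : Nat) (board : List (List Int)) (v : List (List Bool))
    (h00 : vcell v 0 0 = true)
    (hcl : ∀ y x : Nat, y < M → x < N → vcell v y x = true → expanded N M board v y x) :
    ∀ s y x : Nat, y + x = s → y < M → x < N → reachD board y x = true → vcell v y x = true := by
  intro s
  induction s using Nat.strong_induction_on with
  | _ s ih =>
      intro y x hs hy hx hr
      match y, x with
      | 0, 0 => exact h00
      | 0, x + 1 =>
          simp [reachD_0s] at hr
          have hprev : vcell v 0 x = true :=
            ih (0 + x) (by omega) 0 x rfl hy (by omega) hr.2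
          exact (hcl 0 x hy (by omega) hprev).1 hx hr.1
      | y + 1, 0 =>
          simp [reachD_s0] at hr
          have hprev : vcell v y 0 = true :=
            ih (y + 0) (by omega) y 0 rfl (by omega) hx hr.2
          exact (hcl y 0 (by omega) hx hprev).2 hy hr.1
      | y + 1, x + 1 =>
          simp [reachD_ss] at hr
          rcases hr.2 with h | h
          · have hprev : vcell v y (x + 1) = true :=
              ih (y + (x + 1)) (by omega) y (x + 1) rfl (by omega) hx h
            exact (hcl y (x + 1) (by omega) hx hprev).2 hy hr.1
          · have hprev : vcell v (y + 1) x = true :=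
              ih ((y + 1) + x) (by omega) (y + 1) x rfl hy (by omega) h
            exact (hcl (y + 1) x hy (by omega) hprev).1 hx hr.1

-- all facts needed about one stepA call, for a neighbour (↑y', ↑x')
theorem stepA_spec (N M : Nat) (board : List (List Int))
    (q : List (Int × Int)) (v : List (List Bool)) (y' x' : Nat)
    (hpres : y' < M → x' < N → present board y' x')
    (hd : dims N M v)
    (hstep : y' < M → x' < N → bvalB board y' x' = 1 → reachD board y' x' = true) :
    dims N M (stepA (N : Int) (M : Int) board (q, v) (y' : Int) (x' : Int)).2 ∧
    (∀ a b : Nat, vcell v a b = true →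
        vcell (stepA (N : Int) (M : Int) board (q, v) (y' : Int) (x' : Int)).2 a b = true) ∧
    (∀ a b : Nat, a < M → b < N →
        vcell (stepA (N : Int) (M : Int) board (q, v) (y' : Int) (x' : Int)).2 a b = true →
        vcell v a b = true ∨ (a = y' ∧ b = x' ∧ reachD board a b = true ∧
          ((a : Int), (b : Int)) ∈ (stepA (N : Int) (M : Int) board (q, v) (y' : Int) (x' : Int)).1)) ∧
    (∀ p ∈ (stepA (N : Int) (M : Int) board (q, v) (y' : Int) (x' : Int)).1,
        p ∈ q ∨ (p = ((y' : Int), (x' : Int)) ∧ y' < M ∧ x' < N ∧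
          vcell (stepA (N : Int) (M : Int) board (q, v) (y' : Int) (x' : Int)).2 y' x' = true ∧
          reachD board y' x' = true)) ∧
    (y' < M → x' < N → bvalB board y' x' = 1 →
        vcell (stepA (N : Int) (M : Int) board (q, v) (y' : Int) (x' : Int)).2 y' x' = true) ∧
    (3 * fc (stepA (N : Int) (M : Int) board (q, v) (y' : Int) (x' : Int)).2
       + (stepA (N : Int) (M : Int) board (q, v) (y' : Int) (x' : Int)).1.length
       ≤ 3 * fc v + q.length) ∧
    (∀ p ∈ q, p ∈ (stepA (N : Int) (M : Int) board (q, v) (y' : Int) (x' : Int)).1) := by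
  unfold stepA
  split
  next hg =>
    obtain ⟨-, h2, -, h4, h5, h6⟩ := hg
    have hyM : y' < M := by exact_mod_cast h2
    have hxN : x' < N := by exact_mod_cast h4
    have hval : bvalB board y' x' = 1 := by
      rw [bget_eq board y' x' (hpres hyM hxN)] at h5
      exact Option.some.inj h5
    have hfalse : vcell v y' x' = false := by
      rw [vget_eq N M v y' x' hd hyM hxN] at h6
      exact Option.some.inj h6
    have hreach : reachD board y' x' = true := hstep hyM hxN hval
    simp only [Int.toNat_natCast]
    have hself : vcell (vsetA v y' x') y' x' = true := vcell_vset_self N M v y' x' hd hyM hxN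
    refine ⟨vset_dims N M v y' x' hd, ?_, ?_, ?_, fun _ _ _ => hself, ?_, ?_⟩
    · intro a b hab
      by_cases h : a = y' ∧ b = x'
      · obtain ⟨rfl, rfl⟩ := h; rw [hfalse] at hab; exact absurd hab (by simp)
      · rwa [vcell_vset_other v y' x' a b h]
    · intro a b ha hbb hab
      by_cases h : a = y' ∧ b = x'
      · obtain ⟨rfl, rfl⟩ := h
        exact Or.inr ⟨rfl, rfl, hreach, by simp⟩
      · rw [vcell_vset_other v y' x' a b h] at hab; exact Or.inl hab
    · intro p hp
      rcases List.mem_append.mp hp with h | h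
      · exact Or.inl h
      · simp at h
        exact Or.inr ⟨by simp [h], hyM, hxN, hself, hreach⟩
    · have := fc_vset N M v y' x' hd hyM hxN hfalse
      simp only [List.length_append, List.length_cons, List.length_nil]
      omega
    · intro p hp; exact List.mem_append.mpr (Or.inl hp)
  next hg =>
    refine ⟨hd, fun a b h => h, fun a b _ _ h => Or.inl h, fun p hp => Or.inl hp, ?_, le_refl _, fun p hp => hp⟩
    intro hyM hxN hval
    by_contra hnv
    have hfalse : vcell v y' x' = false := by
      cases h : vcell v y' x' with
      | false => rfl
      | true => exact absurd h hnv
    exact hg ⟨Int.natCast_nonneg y', by exact_mod_cast hyM, Int.natCast_nonneg x', by exact_mod_cast hxN,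
      by rw [bget_eq board y' x' (hpres hyM hxN), hval],
      by rw [vget_eq N M v y' x' hd hyM hxN, hfalse]⟩

theorem cell_one_bounds (board : List (List Int)) (y x : Nat)
    (h : cellD board y x = 1) :
    y < board.length ∧ x < (board.getD y []).length := by
  unfold cellD at h
  constructor
  · by_contra hy
    rw [List.getD_eq_getElem?_getD (l := board), List.getElem?_eq_none (by omega)] at h
    simp at h
  · by_contra hx
    rw [List.getD_eq_getElem?_getD (l := board.getD y []), List.getElem?_eq_none (by omega)] at h
    simp at h

theorem reach_in_bounds (board : List (List Int)) (y x : Nat)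
    (hr : reachD board y x = true) :
    y < board.length + 1 ∧ x < (board.getD y []).length + 1 := by
  match y, x with
  | 0, 0 => omega
  | 0, x + 1 =>
      rw [reachD_0s] at hr
      simp at hr
      have := cell_one_bounds board 0 (x + 1) hr.1
      omega
  | y + 1, 0 =>
      rw [reachD_s0] at hr
      simp at hr
      have := cell_one_bounds board (y + 1) 0 hr.1
      omega
  | y + 1, x + 1 =>
      rw [reachD_ss] at hr
      simp at hr
      have := cell_one_bounds board (y + 1) (x + 1) hr.1
      omega

theorem okCell_spec (board : List (List Int)) (M N y x : Nat)
    (h : okCell board M N y x = true)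
    (hr : reachD board y x = true) (hne : ¬(y = M - 1 ∧ x = N - 1)) :
    (x + 1 < N → present board y (x + 1)) ∧ (y + 1 < M → present board (y + 1) x) := by
  simp [okCell, presentB, hr] at h
  rcases h with h | h
  · exact absurd h hne
  · constructor
    · intro hlt
      rcases h.1 with h' | h'
      · omega
      · exact h'
    · intro hlt
      rcases h.2 with h' | h'
      · omega
      · exact h'

theorem loop_spec (N M : Nat) (board : List (List Int)) (hN : 1 ≤ N) (hM : 1 ≤ M)
    (hacc : ∀ y < M, ∀ x < N, reachD board y x = true → ¬(y = M - 1 ∧ x = N - 1) →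
      (x + 1 < N → present board y (x + 1)) ∧ (y + 1 < M → present board (y + 1) x)) :
    ∀ fuel (q : List (Int × Int)) (v : List (List Bool)),
      BfsInv N M board q v → 3 * fc v + q.length < fuel →
      bfsLoop (N : Int) (M : Int) board fuel q v
        = (if reachD board (M - 1) (N - 1) then "Yes" else "No") := by
  intro fuel
  induction fuel with
  | zero => intro q v _ h; omega
  | succ f ih =>
      intro q v hInv hfuel
      obtain ⟨hd, hq, hcl4, h00, htgt⟩ := hInv
      match q with
      | [] =>
          have hnr : reachD board (M - 1) (N - 1) = false := by
            by_contra h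
            have hr : reachD board (M - 1) (N - 1) = true := by
              cases hh : reachD board (M - 1) (N - 1)
              · exact absurd hh h
              · rfl
            have hcl : ∀ y x : Nat, y < M → x < N → vcell v y x = true →
                expanded N M board v y x := by
              intro y x hy hx hv
              rcases hcl4 y x hy hx hv with hmem | hexp
              · exact absurd hmem (List.not_mem_nil)
              · exact hexp
            have hvt := closed_reach N M board v h00 hcl ((M-1)+(N-1)) (M-1) (N-1) rfl
              (by omega) (by omega) hr
            exact absurd (htgt hvt) (List.not_mem_nil)
          simp [bfsLoop, hnr]
      | p :: rest =>
          obtain ⟨y, x, rfl, hy, hx, hvyx, hryx⟩ := hq _ (List.mem_cons_self)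
          show bfsLoop (N : Int) (M : Int) board (f + 1) (((y : Int), (x : Int)) :: rest) v = _
          rw [bfsLoop]
          split
          next htar =>
            have : y = M - 1 ∧ x = N - 1 := by
              obtain ⟨h1, h2⟩ := htar
              constructor <;> omega
            rw [this.1, this.2] at hryx
            simp [hryx]
          next htar =>
            have hne : ¬(y = M - 1 ∧ x = N - 1) := by
              intro ⟨h1, h2⟩
              exact htar ⟨by omega, by omega⟩
            -- step 1: right neighbour (y, x+1)
            have hx1 : ((x : Int) + 1) = ((x + 1 : Nat) : Int) := by push_cast; ring
            rw [hx1]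
            have hnbr := hacc y hy x hx hryx hne
            obtain ⟨d1, mono1, s3₁, s4₁, s5₁, meas1, pres1⟩ :=
              stepA_spec N M board rest v y (x + 1)
                (fun _ hx1 => hnbr.1 hx1) hd
                (fun _ _ hv => reach_right board y x hryx hv)
            set r1 := stepA (N : Int) (M : Int) board (rest, v) (y : Int) ((x + 1 : Nat) : Int) with hr1
            -- step 2: down neighbour (y+1, x)
            have hy1 : ((y : Int) + 1) = ((y + 1 : Nat) : Int) := by push_cast; ring
            rw [hy1]
            have hr1p : r1 = (r1.1, r1.2) := rfl
            rw [hr1p]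
            obtain ⟨d2, mono2, s3₂, s4₂, s5₂, meas2, pres2⟩ :=
              stepA_spec N M board r1.1 r1.2 (y + 1) x
                (fun hy1 _ => hnbr.2 hy1) d1
                (fun _ _ hv => reach_down board y x hryx hv)
            set r2 := stepA (N : Int) (M : Int) board (r1.1, r1.2) ((y + 1 : Nat) : Int) (x : Int) with hr2
            apply ih
            · -- invariant preserved
              refine ⟨d2, ?_, ?_, mono2 _ _ (mono1 _ _ h00), ?_⟩
              · -- queue elements
                intro p hp
                rcases s4₂ p hp with hp1 | ⟨rfl, hyM, hxN, hvt, hrch⟩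
                · rcases s4₁ p (by
                    exact hp1) with hpr | ⟨rfl, hyM, hxN, hvt, hrch⟩
                  · obtain ⟨a, bb, rfl, ha, hbb, hva, hra⟩ := hq _ (List.mem_cons_of_mem _ hpr)
                    exact ⟨a, bb, rfl, ha, hbb, mono2 _ _ (mono1 _ _ hva), hra⟩
                  · exact ⟨y, x + 1, rfl, hyM, hxN, mono2 _ _ hvt, hrch⟩
                · exact ⟨y + 1, x, rfl, hyM, hxN, hvt, hrch⟩
              · -- visited → in queue or expanded
                intro a b ha hbb hvab
                rcases s3₂ a b ha hbb hvab with hv1 | ⟨rfl, rfl, _, hmem⟩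
                · rcases s3₁ a b ha hbb hv1 with hv0 | ⟨rfl, rfl, _, hmem⟩
                  · rcases hcl4 a b ha hbb hv0 with hmem | hexp
                    · rcases List.mem_cons.mp hmem with heq | hmem'
                      · -- the popped cell: now expanded
                        have h1 : (a : Int) = (y : Int) := congrArg Prod.fst heq
                        have h2 : (b : Int) = (x : Int) := congrArg Prod.snd heq
                        have hay : a = y := by exact_mod_cast h1
                        have hbx : b = x := by exact_mod_cast h2
                        subst hay; subst hbx
                        refine Or.inr ⟨?_, ?_⟩
                        · intro hlt hval
                          exact mono2 _ _ (s5₁ ha hlt hval)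
                        · intro hlt hval
                          exact s5₂ hlt hbb hval
                      · exact Or.inl (pres2 _ (pres1 _ hmem'))
                    · exact Or.inr ⟨fun h1 h2 => mono2 _ _ (mono1 _ _ (hexp.1 h1 h2)),
                        fun h1 h2 => mono2 _ _ (mono1 _ _ (hexp.2 h1 h2))⟩
                  · exact Or.inl (pres2 _ hmem)
                · exact Or.inl hmem
              · -- target tracking
                intro hvt
                rcases s3₂ (M - 1) (N - 1) (by omega) (by omega) hvt with hv1 | ⟨he1, he2, _, hmem⟩
                · rcases s3₁ (M - 1) (N - 1) (by omega) (by omega) hv1 with hv0 | ⟨he1, he2, _, hmem⟩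
                  · have := htgt hv0
                    rcases List.mem_cons.mp this with heq | hmem'
                    · exfalso
                      apply hne
                      have h1 : (y : Int) = (M : Int) - 1 := (Prod.mk.injEq _ _ _ _ ▸ heq).1.symm
                      have h2 : (x : Int) = (N : Int) - 1 := (Prod.mk.injEq _ _ _ _ ▸ heq).2.symm
                      constructor <;> omega
                    · have := pres2 _ (pres1 _ hmem')
                      convert this using 2
                  · have := pres2 _ hmem
                    convert this using 2 <;> omega
                · convert hmem using 2 <;> omega
            · -- measure
              have : 3 * fc r2.2 + r2.1.length ≤ 3 * fc v + rest.length := le_trans meas2 meas1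
              simp only [List.length_cons] at hfuel
              omega

theorem vcell_v0_cases (N M a b : Nat) (_hN : 1 ≤ N) (_hM : 1 ≤ M)
    (h : vcell (vsetA (List.replicate M (List.replicate N false)) 0 0) a b = true) :
    a = 0 ∧ b = 0 := by
  by_contra hc
  rw [vcell_vset_other _ _ _ _ _ hc, vcell_replicate] at h
  exact absurd h (by simp)

theorem fc_replicate (N M : Nat) :
    fc (List.replicate M (List.replicate N false)) = M * N := by
  unfold fc
  simp [List.map_replicate, List.sum_replicate, Nat.mul_comm]

theorem dims_replicate (N M : Nat) :
    dims N M (List.replicate M (List.replicate N false)) := by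
  refine ⟨by simp, ?_⟩
  intro r hr
  rw [List.eq_of_mem_replicate hr]
  simp

-- ===== VERDICT (by name: the statement is the Claim_ definition above) =====
theorem bfs_spec : Claim_equal_bfs := by
  intro n m board _ hpre
  obtain ⟨hn, hm, hacc⟩ := hpre
  unfold Spec_bfs
  set N := n.toNat with hNdef
  set M := m.toNat with hMdef
  have hN : 1 ≤ N := by omega
  have hM : 1 ≤ M := by omega
  have hn' : n = (N : Int) := by omega
  have hm' : m = (M : Int) := by omega
  rw [hn', hm']
  rw [alt_spec board N M hN hM]
  unfold bfs
  simp only [Int.toNat_natCast]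
  set v0 := vsetA (List.replicate M (List.replicate N false)) 0 0 with hv0
  have hd0 : dims N M v0 := vset_dims N M _ 0 0 (dims_replicate N M)
  have h00 : vcell v0 0 0 = true :=
    vcell_vset_self N M _ 0 0 (dims_replicate N M) (by omega) (by omega)
  have hfc : fc v0 + 1 = M * N :=
    (fc_replicate N M) ▸ fc_vset N M _ 0 0 (dims_replicate N M) (by omega) (by omega)
      (by rw [vcell_replicate])
  apply loop_spec N M board hN hM
    (fun y hy x hx hr hne =>
      okCell_spec board M N y x
        (hacc y (lt_min hy (reach_in_bounds board y x hr).1)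
              x (lt_min hx (reach_in_bounds board y x hr).2)) hr hne)
  · refine ⟨hd0, ?_, ?_, h00, ?_⟩
    · intro p hp
      rcases List.mem_cons.mp hp with rfl | hmem
      · exact ⟨0, 0, by norm_num, by omega, by omega, h00, by simp [reachD_00]⟩
      · exact absurd hmem (List.not_mem_nil)
    · intro y x hy hx hv
      obtain ⟨rfl, rfl⟩ := vcell_v0_cases N M y x hN hM hv
      exact Or.inl (by norm_num)
    · intro hv
      obtain ⟨h1, h2⟩ := vcell_v0_cases N M (M - 1) (N - 1) hN hM hv
      have heq : ((M : Int) - 1, ((N : Int) - 1)) = (((0 : Nat) : Int), ((0 : Nat) : Int)) := by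
        rw [Prod.mk.injEq]
        constructor <;> omega
      rw [heq]
      simp
  · simp only [List.length_cons, List.length_nil]
    omega
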